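-- pv_equiv track=rewrite | github.com/ingridjackeline/tst-lp1 | tst/exercicios/exercicio47/time_campeao.py | time_campeao
-- ===== SOURCE A (Python) =====
-- def time_campeao(dados):
-- 	maior_quant_pontos = 0
-- 	time_campeao = []
--
-- 	for time in dados:
-- 		if dados[time][0] > maior_quant_pontos:
-- 			maior_quant_pontos = dados[time][0]
--
-- 	for time in dados:
-- 		if dados[time][0] == maior_quant_pontos:
-- 			time_campeao.append(time)
--
-- 	return time_campeao
-- ===== SOURCE B (Python) =====
-- def time_campeao(dados):
-- 	maior_quant_pontos = 0
-- 	time_campeao = []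
--
-- 	for time, pontos in dados.items():
-- 		p = pontos[0]
-- 		if p > maior_quant_pontos:
-- 			maior_quant_pontos = p
-- 			time_campeao = [time]
-- 		elif p == maior_quant_pontos:
-- 			time_campeao.append(time)
--
-- 	return time_campeao
-- ===== Notes on version B (the rewrite author's own statement) =====
-- stated objective: simpler
-- what changed: B replaces A's two passes (one to find the maximum first-entry, one to collect the teams attaining it) and its per-team dict lookups dados[time] by a single pass over dados.items() that maintains the running maximum and the current list of champions, resetting the list when a larger score appears.
-- outside the precondition, e.g. on time_campeao({'a': []}): A raises IndexError, B raises IndexError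
import Mathlib
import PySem

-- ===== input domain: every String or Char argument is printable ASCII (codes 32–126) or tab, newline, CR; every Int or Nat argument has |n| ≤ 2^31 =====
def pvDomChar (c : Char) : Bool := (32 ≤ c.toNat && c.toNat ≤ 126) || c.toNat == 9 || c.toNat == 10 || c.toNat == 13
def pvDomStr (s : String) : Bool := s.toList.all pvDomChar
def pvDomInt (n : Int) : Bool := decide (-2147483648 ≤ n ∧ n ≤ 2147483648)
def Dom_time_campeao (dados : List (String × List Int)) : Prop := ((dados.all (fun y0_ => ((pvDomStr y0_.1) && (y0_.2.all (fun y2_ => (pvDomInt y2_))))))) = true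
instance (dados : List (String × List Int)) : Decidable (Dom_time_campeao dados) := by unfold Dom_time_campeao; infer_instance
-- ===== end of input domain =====

-- B: single pass over the items maintaining (running max, current champion list), instead of A's
-- two passes with dict lookups; objective: simpler. Equivalence proved on dicts (Nodup keys)
-- whose value lists are nonempty (A raises IndexError on an empty one).


-- ===== PORT A =====
-- dados[time][0], with dados[time] the first-match association-list lookup (Python dict lookup)
def aLookupVal (dados : List (String × List Int)) (t : String) : Option Int :=
  (dados.lookup t).bind (fun l => PySem.List.pyGet? l 0)

def time_campeao (dados : List (String × List Int)) : List String :=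
  let maior_quant_pontos : Int :=
    dados.foldl (fun m p =>
      match aLookupVal dados p.1 with
      | some v => if v > m then v else m
      | none => m) 0
  dados.foldl (fun acc p =>
    match aLookupVal dados p.1 with
    | some v => if v = maior_quant_pontos then acc ++ [p.1] else acc
    | none => acc) []

-- ===== PORT B =====
def time_campeao_alt (dados : List (String × List Int)) : List String :=
  (dados.foldl (fun (s : Int × List String) p =>
    match PySem.List.pyGet? p.2 0 with
    | some v =>
        if v > s.1 then (v, [p.1])
        else if v = s.1 then (s.1, s.2 ++ [p.1])
        else s
    | none => s) ((0 : Int), ([] : List String))).2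

-- ===== PRECONDITION & SPEC =====
-- Pre_ excludes inputs where A raises IndexError (some team's point list is empty) and
-- assoc lists with duplicate keys, which cannot arise from a Python dict (the dict
-- representation is ambiguous there).
def Pre_time_campeao (dados : List (String × List Int)) : Prop :=
  (dados.map Prod.fst).Nodup ∧ ∀ p ∈ dados, p.2 ≠ []
instance (dados : List (String × List Int)) : Decidable (Pre_time_campeao dados) := by
  unfold Pre_time_campeao; infer_instance

def pvWitness_time_campeao : (List (String × List Int)) :=
  [("x", [3, 1]), ("y", [3]), ("z", [2])]

def Spec_time_campeao (dados : List (String × List Int)) (out : List String) : Prop := out = time_campeao_alt dados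
instance (dados : List (String × List Int)) (out : List String) : Decidable (Spec_time_campeao dados out) := by unfold Spec_time_campeao; infer_instance

-- ===== CLAIM (what is proved, stated in full; the proofs are below) =====
def Claim_equal_time_campeao : Prop := ∀ (dados : List (String × List Int)), Dom_time_campeao dados → Pre_time_campeao dados → Spec_time_campeao dados (time_campeao dados)

-- ===== LEMMAS AND PROOFS =====

-- the first entry of p's point list, as an Int (the value both programs compare), default 0
def pval (p : String × List Int) : Int := p.2.headD 0

theorem lookup_self {dados : List (String × List Int)} (hnd : (dados.map Prod.fst).Nodup)
    {p : String × List Int} (hp : p ∈ dados) : dados.lookup p.1 = some p.2 := by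
  induction dados with
  | nil => cases hp
  | cons q t ih =>
    rw [List.map_cons, List.nodup_cons] at hnd
    rcases List.mem_cons.mp hp with hp | hp
    · subst hp; simp [List.lookup]
    · have hmem : p.1 ∈ t.map Prod.fst := List.mem_map_of_mem hp
      have hne : (p.1 == q.1) = false :=
        beq_eq_false_iff_ne.mpr (fun h => hnd.1 (h ▸ hmem))
      simp [List.lookup, hne, ih hnd.2 hp]

theorem aLookupVal_self {dados : List (String × List Int)} (hnd : (dados.map Prod.fst).Nodup)
    (hne : ∀ p ∈ dados, p.2 ≠ []) {p : String × List Int} (hp : p ∈ dados) :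
    aLookupVal dados p.1 = some (pval p) := by
  unfold aLookupVal
  rw [lookup_self hnd hp]
  cases h : p.2 with
  | nil => exact absurd h (hne p hp)
  | cons a l => simp [pval, h]

-- the running-maximum fold
def mfold (l : List (String × List Int)) (m : Int) : Int :=
  l.foldl (fun m p => if pval p > m then pval p else m) m

theorem le_mfold (l : List (String × List Int)) (m : Int) : m ≤ mfold l m := by
  induction l generalizing m with
  | nil => simp [mfold]
  | cons p t ih =>
    simp only [mfold, List.foldl_cons]
    split_ifs with h
    · exact le_trans (le_of_lt h) (ih (pval p))
    · exact ih m

-- B's fold with explicit state, characterised against mfold and a filter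
def bstep (s : Int × List String) (p : String × List Int) : Int × List String :=
  if pval p > s.1 then (pval p, [p.1])
  else if pval p = s.1 then (s.1, s.2 ++ [p.1])
  else s

theorem bfold_spec (l : List (String × List Int)) (m : Int) (acc : List String) :
    l.foldl bstep (m, acc) =
      (mfold l m,
       (if mfold l m = m then acc else []) ++
         (l.filter (fun p => pval p = mfold l m)).map Prod.fst) := by
  induction l generalizing m acc with
  | nil => simp [mfold]
  | cons p t ih =>
    have hM : mfold (p :: t) m = mfold t (if pval p > m then pval p else m) := by
      simp [mfold]
    by_cases hgt : pval p > m
    · have hstep : bstep (m, acc) p = (pval p, [p.1]) := by simp [bstep, hgt]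
      have hle := le_mfold t (pval p)
      rw [List.foldl_cons, hstep, ih, hM, if_pos hgt, List.filter_cons]
      generalize mfold t (pval p) = M at hle ⊢
      have hMm : M ≠ m := fun h => absurd (lt_of_lt_of_le hgt hle) (by simp [h])
      rw [if_neg hMm]
      by_cases h : pval p = M
      · simp [h]
      · have h2 : ¬ (M = pval p) := fun hc => h hc.symm
        simp [h, h2]
    · have hM' : mfold (p :: t) m = mfold t m := by rw [hM, if_neg hgt]
      have hle := le_mfold t m
      by_cases heq : pval p = m
      · have hstep : bstep (m, acc) p = (m, acc ++ [p.1]) := by simp [bstep, heq]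
        rw [List.foldl_cons, hstep, ih, hM', List.filter_cons]
        generalize mfold t m = M at hle ⊢
        by_cases h : M = m
        · simp [h, heq]
        · have h2 : ¬ (pval p = M) := fun hc => h (by rw [← hc, heq])
          simp [h, h2]
      · have hstep : bstep (m, acc) p = (m, acc) := by simp [bstep, hgt, heq]
        have hlt : pval p < m := lt_of_le_of_ne (not_lt.mp hgt) heq
        rw [List.foldl_cons, hstep, ih, hM', List.filter_cons]
        generalize mfold t m = M at hle ⊢
        have h2 : ¬ (pval p = M) :=
          fun hc => absurd (lt_of_lt_of_le hlt hle) (by simp [hc])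
        simp [h2]

-- A's collecting fold is the same filter
theorem afold_filter (l : List (String × List Int)) (M : Int) (acc : List String) :
    l.foldl (fun acc p => if pval p = M then acc ++ [p.1] else acc) acc =
      acc ++ (l.filter (fun p => pval p = M)).map Prod.fst := by
  induction l generalizing acc with
  | nil => simp
  | cons p t ih =>
    by_cases h : pval p = M <;> simp [h, ih]

-- ===== VERDICT (by name: the statement is the Claim_ definition above) =====
theorem time_campeao_spec : Claim_equal_time_campeao := by
  intro dados _ hpre
  obtain ⟨hnd, hne⟩ := hpre
  unfold Spec_time_campeao time_campeao time_campeao_alt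
  -- rewrite A's lookups and B's pyGet? into pval on members of dados
  have hA1 : dados.foldl (fun m p =>
      match aLookupVal dados p.1 with
      | some v => if v > m then v else m
      | none => m) 0 = mfold dados 0 := by
    apply PySem.List.foldl_congr_mem
    intro m p hp
    rw [aLookupVal_self hnd hne hp]
  rw [hA1]
  have hA2 : dados.foldl (fun acc p =>
      match aLookupVal dados p.1 with
      | some v => if v = mfold dados 0 then acc ++ [p.1] else acc
      | none => acc) [] =
      dados.foldl (fun acc p => if pval p = mfold dados 0 then acc ++ [p.1] else acc) [] := by
    apply PySem.List.foldl_congr_mem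
    intro acc p hp
    rw [aLookupVal_self hnd hne hp]
  have hB : dados.foldl (fun (s : Int × List String) p =>
      match PySem.List.pyGet? p.2 0 with
      | some v => if v > s.1 then (v, [p.1]) else if v = s.1 then (s.1, s.2 ++ [p.1]) else s
      | none => s) ((0 : Int), ([] : List String)) = dados.foldl bstep (0, []) := by
    apply PySem.List.foldl_congr_mem
    intro s p hp
    cases h : p.2 with
    | nil => exact absurd h (hne p hp)
    | cons a l => simp [bstep, pval, h]
  rw [hA2, hB, bfold_spec, afold_filter]
  simp
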